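-- pv_equiv track=rewrite | github.com/EsteRiNooo/gt7_tg_bot | services/lfm_series_cards.py | _ordered_sims
-- ===== SOURCE A (Python) =====
-- SIM_BLOCK_ORDER: list[str] = [
--     "Automobilista 2",
--     "Le Mans Ultimate",
--     "Assetto Corsa Competizione",
--     "Assetto Corsa EVO",
--     "iRacing",
--     "rFactor 2",
--     "RaceRoom",
-- ]
--
-- def _ordered_sims(sims: set[str]) -> list[str]:
--     remaining = set(sims)
--     ordered: list[str] = []
--     for name in SIM_BLOCK_ORDER:
--         if name in remaining:
--             ordered.append(name)
--             remaining.discard(name)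
--     ordered.extend(sorted(remaining))
--     return ordered
-- ===== SOURCE B (Python) =====
-- SIM_BLOCK_ORDER: list[str] = [
--     "Automobilista 2",
--     "Le Mans Ultimate",
--     "Assetto Corsa Competizione",
--     "Assetto Corsa EVO",
--     "iRacing",
--     "rFactor 2",
--     "RaceRoom",
-- ]
--
-- def _ordered_sims(sims: set[str]) -> list[str]:
--     pos = {name: i for i, name in enumerate(SIM_BLOCK_ORDER)}
--     sentinel = len(SIM_BLOCK_ORDER)
--     return sorted(sims, key=lambda n: (pos.get(n, sentinel), "" if n in pos else n))
-- ===== Notes on version B (the rewrite author's own statement) =====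
-- stated objective: simpler
-- what changed: A's two-phase partition loop over the priority list plus a second sort of the leftovers is replaced by a single keyed sort whose key is (priority-table rank, name-as-tiebreak), a dict built once giving each priority name its index and every other name the sentinel rank.
import Mathlib
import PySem

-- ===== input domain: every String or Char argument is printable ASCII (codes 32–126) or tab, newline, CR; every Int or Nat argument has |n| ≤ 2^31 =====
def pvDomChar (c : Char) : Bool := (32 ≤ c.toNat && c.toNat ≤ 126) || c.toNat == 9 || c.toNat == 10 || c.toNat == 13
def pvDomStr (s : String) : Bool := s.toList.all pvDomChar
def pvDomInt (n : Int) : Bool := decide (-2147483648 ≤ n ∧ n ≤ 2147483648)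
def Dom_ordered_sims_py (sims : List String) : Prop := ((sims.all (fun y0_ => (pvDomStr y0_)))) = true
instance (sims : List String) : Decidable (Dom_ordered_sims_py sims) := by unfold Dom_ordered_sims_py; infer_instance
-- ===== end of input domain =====

-- B replaces A's two-phase partition loop + second sort by a single keyed sort
-- (priority rank, then the name as alphabetical tiebreak for non-priority sims): objective 'simpler'.

-- ===== PORT A =====
def SIM_BLOCK_ORDER : List String :=
  ["Automobilista 2", "Le Mans Ultimate", "Assetto Corsa Competizione",
   "Assetto Corsa EVO", "iRacing", "rFactor 2", "RaceRoom"]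

def ordered_sims_py (sims : List String) : List String :=
  -- remaining = set(sims); for name in SIM_BLOCK_ORDER: append+discard; ordered.extend(sorted(remaining))
  let remaining : PySem.Set String := PySem.Set.ofList sims
  let st := SIM_BLOCK_ORDER.foldl
    (fun (st : List String × PySem.Set String) name =>
      if PySem.Set.contains st.2 name then (st.1 ++ [name], PySem.Set.discard st.2 name)
      else st)
    (([] : List String), remaining)
  st.1 ++ PySem.List.sorted st.2 (fun x => x)

-- ===== PORT B =====
def ordered_sims_py_alt (sims : List String) : List String :=
  let pos : PySem.Dict String Int :=
    (PySem.List.enumerate SIM_BLOCK_ORDER).foldl (fun d p => d.insert p.2 p.1) PySem.Dict.empty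
  let sentinel : Int := PySem.List.len SIM_BLOCK_ORDER
  PySem.List.sorted2 sims (fun n => pos.getD n sentinel)
    (fun n => if pos.contains n then "" else n)

-- ===== PRECONDITION & SPEC =====
-- Pre_ excludes lists with duplicate entries: the Python parameter is a set[str], which cannot
-- contain duplicates, so a list with duplicates does not represent a valid argument of A.
def Pre_ordered_sims_py (sims : List String) : Prop := sims.Nodup
instance (sims : List String) : Decidable (Pre_ordered_sims_py sims) := by
  unfold Pre_ordered_sims_py; infer_instance
def pvWitness_ordered_sims_py : List String := ["zebra", "iRacing", "a b", "RaceRoom"]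

def Spec_ordered_sims_py (sims : List String) (out : List String) : Prop :=
  out = ordered_sims_py_alt sims
instance (sims : List String) (out : List String) : Decidable (Spec_ordered_sims_py sims out) := by
  unfold Spec_ordered_sims_py; infer_instance

-- ===== CLAIM (what is proved, stated in full; the proofs are below) =====
def Claim_equal_ordered_sims_py : Prop :=
  ∀ (sims : List String), Dom_ordered_sims_py sims → Pre_ordered_sims_py sims →
    Spec_ordered_sims_py sims (ordered_sims_py sims)

-- ===== LEMMAS AND PROOFS =====

-- B's position dict, fully evaluated, and the components of B's sort key.
def posLit : PySem.Dict String Int :=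
  PySem.Dict.mk [("Automobilista 2", 0), ("Le Mans Ultimate", 1), ("Assetto Corsa Competizione", 2),
    ("Assetto Corsa EVO", 3), ("iRacing", 4), ("rFactor 2", 5), ("RaceRoom", 6)]

def rankOf (n : String) : Int := posLit.getD n 7
def tieOf (n : String) : String := if posLit.contains n then "" else n
def keyOf (n : String) : Int ×ₗ String := toLex (rankOf n, tieOf n)

-- a Python tuple-key sort is a sort by the lexicographic product key
lemma sorted2_eq_sorted_lex {α κ₁ κ₂ : Type} [LinearOrder κ₁] [LinearOrder κ₂]
    (xs : List α) (k1 : α → κ₁) (k2 : α → κ₂) :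
    PySem.List.sorted2 xs k1 k2 = PySem.List.sorted xs (fun x => toLex (k1 x, k2 x)) := by
  have hb : (fun a b => decide (k1 a < k1 b) || (!decide (k1 b < k1 a) && decide (k2 a < k2 b)))
      = (fun a b => decide ((toLex (k1 a, k2 a) : κ₁ ×ₗ κ₂) < toLex (k1 b, k2 b))) := by
    funext a b
    rcases lt_trichotomy (k1 a) (k1 b) with h | h | h
    · simp [Prod.Lex.lt_iff, h]
    · simp [Prod.Lex.lt_iff, h]
    · have hne : k1 a ≠ k1 b := ne_of_gt h
      simp [Prod.Lex.lt_iff, lt_asymm h, hne]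
      exact fun hle => absurd (lt_of_lt_of_le h hle) (lt_irrefl _)
  change xs.foldl
      (fun acc x => PySem.List.insertBy
        (fun a b => decide (k1 a < k1 b) || (!decide (k1 b < k1 a) && decide (k2 a < k2 b))) x acc) []
    = xs.foldl
      (fun acc x => PySem.List.insertBy
        (fun a b => decide ((toLex (k1 a, k2 a) : κ₁ ×ₗ κ₂) < toLex (k1 b, k2 b))) x acc) []
  rw [hb]

lemma alt_eq_sorted_key (sims : List String) :
    ordered_sims_py_alt sims = PySem.List.sorted sims keyOf := by
  show PySem.List.sorted2 sims _ _ = _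
  rw [sorted2_eq_sorted_lex]
  rfl

lemma rank_tie_of_not_mem {n : String} (h : n ∉ SIM_BLOCK_ORDER) :
    rankOf n = 7 ∧ tieOf n = n := by
  simp only [SIM_BLOCK_ORDER, List.mem_cons, List.not_mem_nil, or_false, not_or] at h
  obtain ⟨h1, h2, h3, h4, h5, h6, h7⟩ := h
  have e1 : ("Automobilista 2" == n) = false := beq_eq_false_iff_ne.mpr (Ne.symm h1)
  have e2 : ("Le Mans Ultimate" == n) = false := beq_eq_false_iff_ne.mpr (Ne.symm h2)
  have e3 : ("Assetto Corsa Competizione" == n) = false := beq_eq_false_iff_ne.mpr (Ne.symm h3)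
  have e4 : ("Assetto Corsa EVO" == n) = false := beq_eq_false_iff_ne.mpr (Ne.symm h4)
  have e5 : ("iRacing" == n) = false := beq_eq_false_iff_ne.mpr (Ne.symm h5)
  have e6 : ("rFactor 2" == n) = false := beq_eq_false_iff_ne.mpr (Ne.symm h6)
  have e7 : ("RaceRoom" == n) = false := beq_eq_false_iff_ne.mpr (Ne.symm h7)
  constructor
  · simp [rankOf, posLit, PySem.Dict.getD, PySem.Dict.get?,
      e1, e2, e3, e4, e5, e6, e7]
  · simp [tieOf, posLit, PySem.Dict.contains,
      e1, e2, e3, e4, e5, e6, e7]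

lemma rank_lt_of_mem {n : String} (h : n ∈ SIM_BLOCK_ORDER) : rankOf n < 7 := by
  have hall : ∀ m ∈ SIM_BLOCK_ORDER, rankOf m < 7 := by decide
  exact hall n h

lemma order_pairwise_key : SIM_BLOCK_ORDER.Pairwise (fun a b => keyOf a < keyOf b) := by
  decide

lemma order_nodup : SIM_BLOCK_ORDER.Nodup := by decide

lemma contains_filter_ne {rem : List String} {o n : String} (hne : n ≠ o) :
    (List.filter (fun y => !(y == o)) rem).contains n = rem.contains n := by
  by_cases h : n ∈ rem
  · simp [List.mem_filter, h, hne]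
  · simp [List.mem_filter, h]

-- A's partition loop, characterised
lemma loopA (order : List String) (acc rem : List String) (hord : order.Nodup) :
    order.foldl
      (fun (st : List String × PySem.Set String) name =>
        if PySem.Set.contains st.2 name then (st.1 ++ [name], PySem.Set.discard st.2 name)
        else st) (acc, rem)
    = (acc ++ order.filter (fun n => rem.contains n),
       rem.filter (fun n => !order.contains n)) := by
  simp only [PySem.Set.contains, PySem.Set.discard]
  induction order generalizing acc rem with
  | nil => simp
  | cons o os ih =>
    have hoos : o ∉ os := (List.nodup_cons.mp hord).1
    have hos : os.Nodup := (List.nodup_cons.mp hord).2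
    by_cases h : rem.contains o
    · simp only [List.foldl_cons, h, if_pos]
      rw [ih _ _ hos]
      refine Prod.ext ?_ ?_
      · simp only [List.filter_cons, h, if_pos, List.append_assoc, List.singleton_append]
        congr 2
        apply List.filter_congr
        intro n hn
        exact contains_filter_ne (fun e => hoos (e ▸ hn))
      · simp only [List.filter_filter]
        apply List.filter_congr
        intro n _
        by_cases e : n = o <;> simp [e]
    · simp only [List.foldl_cons, h, if_neg, Bool.false_eq_true, not_false_iff]
      rw [ih _ _ hos]
      have honotrem : o ∉ rem := fun hm => h (List.contains_iff_mem.mpr hm)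
      refine Prod.ext ?_ ?_
      · simp [honotrem]
      · apply List.filter_congr
        intro n hn
        have hne : n ≠ o := fun e => honotrem (e ▸ hn)
        simp [hne]

-- ===== VERDICT (by name: the statement is the Claim_ definition above) =====
theorem ordered_sims_py_spec : Claim_equal_ordered_sims_py := by
  intro sims _ hpre
  have hnd : sims.Nodup := hpre
  show ordered_sims_py sims = ordered_sims_py_alt sims
  rw [alt_eq_sorted_key]
  have hA : ordered_sims_py sims
      = SIM_BLOCK_ORDER.filter (fun n => sims.contains n)
        ++ PySem.List.sorted (sims.filter (fun n => !SIM_BLOCK_ORDER.contains n)) (fun x => x) := by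
    show (SIM_BLOCK_ORDER.foldl _ (([] : List String), PySem.Set.ofList sims)).1
        ++ PySem.List.sorted (SIM_BLOCK_ORDER.foldl _ (([] : List String), PySem.Set.ofList sims)).2 (fun x => x) = _
    rw [PySem.Set.ofList_eq_self_of_nodup sims hnd, loopA _ _ _ order_nodup]
    simp
  set P := SIM_BLOCK_ORDER.filter (fun n => sims.contains n) with hP
  set R := PySem.List.sorted (sims.filter (fun n => !SIM_BLOCK_ORDER.contains n)) (fun x => x) with hR
  have hRperm : R.Perm (sims.filter (fun n => !SIM_BLOCK_ORDER.contains n)) :=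
    PySem.List.sorted_perm _ _ _
  have hRmem : ∀ n ∈ R, n ∉ SIM_BLOCK_ORDER := by
    intro n hn
    have := hRperm.mem_iff.mp hn
    have := List.of_mem_filter this
    simpa [List.contains_iff_mem] using this
  have hPmem : ∀ n ∈ P, n ∈ SIM_BLOCK_ORDER := fun n hn => List.mem_of_mem_filter hn
  rw [hA]
  symm
  apply PySem.List.sorted_eq_of_perm_of_pairwise_lt
  · -- (P ++ R).Perm sims
    have h1 : P.Perm (sims.filter (fun n => SIM_BLOCK_ORDER.contains n)) := by
      rw [List.perm_ext_iff_of_nodup (order_nodup.filter _) (hnd.filter _)]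
      intro n
      simp [List.mem_filter, and_comm]
    have h2 : (P ++ R).Perm
        (sims.filter (fun n => SIM_BLOCK_ORDER.contains n)
          ++ sims.filter (fun n => !SIM_BLOCK_ORDER.contains n)) :=
      h1.append hRperm
    exact h2.trans (List.filter_append_perm _ sims)
  · -- strictly increasing key
    rw [List.pairwise_append]
    refine ⟨order_pairwise_key.filter _, ?_, ?_⟩
    · have hle : R.Pairwise (fun a b => a ≤ b) := by
        rw [hR]; exact PySem.List.sorted_pairwise _ _
      have hndR : R.Nodup := (hRperm.symm).nodup (hnd.filter _)
      refine (hle.and hndR).imp_of_mem ?_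
      intro a b ha hb hab
      have hra := rank_tie_of_not_mem (hRmem a ha)
      have hrb := rank_tie_of_not_mem (hRmem b hb)
      have : a < b := lt_of_le_of_ne hab.1 hab.2
      simp [keyOf, Prod.Lex.lt_iff, hra.1, hra.2, hrb.1, hrb.2, this]
    · intro a ha b hb
      have h1 : rankOf a < 7 := rank_lt_of_mem (hPmem a ha)
      have h2 : rankOf b = 7 := (rank_tie_of_not_mem (hRmem b hb)).1
      simp [keyOf, Prod.Lex.lt_iff]
      left
      omega
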